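-- pv_equiv track=rewrite | github.com/isabella232/safe_camera_trap_tools | safe_camera_trap_tools.py | _convert_keywords
-- ===== SOURCE A (Python) =====
-- from itertools import groupby
--
-- def _convert_keywords(keywords):
--
--     """ Unpacks a list of keywords into a dictionary. The keywords are strings with the format
--     'tag_number: value', where tag number can be repeated. The process below combines duplicate tag
--     numbers and strips whitespace padding.
--
--     For example:
--         ['15: E100-2-23', '16: Person', '16: Setup', '24: Phil']
--     goes to
--         {'Tag_15': 'E100-2-23', 'Tag_16': 'Person, Setup', 'Tag_24': 'Phil'}
--     """
--
--     if keywords is None: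
--         return {}
--
--     if isinstance(keywords, str):
--         keywords = [keywords]
--
--     # Split the strings on colons
--     kw_list = [kw.split(':') for kw in keywords]
--
--     # Sort and group on tag number
--     kw_list.sort(key=lambda x: x[0])
--     kw_groups = groupby(kw_list, key=lambda x: x[0])
--
--     # Turn that into a dictionary
--     kw_dict = {}
--     for key, vals in kw_groups:
--         kw_dict['Tag_' + key] = ', '.join(vl[1].strip() for vl in vals)
--
--     return kw_dict
-- ===== SOURCE B (Python) =====
-- def _convert_keywords(keywords):
--     """One pass building an insertion-ordered dict of value lists per raw tag,
--     then emit the groups over the sorted distinct tags (no full-list sort, no groupby)."""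
--     if keywords is None:
--         return {}
--     if isinstance(keywords, str):
--         keywords = [keywords]
--     acc = {}
--     for kw in keywords:
--         parts = kw.split(':')
--         acc[parts[0]] = acc.get(parts[0], []) + [parts[1].strip()]
--     out = {}
--     for key in sorted(acc):
--         out['Tag_' + key] = ', '.join(acc[key])
--     return out
-- ===== Notes on version B (the rewrite author's own statement) =====
-- stated objective: alternative
-- what changed: Replaces A's full-list stable sort plus itertools.groupby with a single pass that accumulates per-tag value lists in an insertion-ordered dict, then emits groups over the sorted distinct tags only.
import Mathlib
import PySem

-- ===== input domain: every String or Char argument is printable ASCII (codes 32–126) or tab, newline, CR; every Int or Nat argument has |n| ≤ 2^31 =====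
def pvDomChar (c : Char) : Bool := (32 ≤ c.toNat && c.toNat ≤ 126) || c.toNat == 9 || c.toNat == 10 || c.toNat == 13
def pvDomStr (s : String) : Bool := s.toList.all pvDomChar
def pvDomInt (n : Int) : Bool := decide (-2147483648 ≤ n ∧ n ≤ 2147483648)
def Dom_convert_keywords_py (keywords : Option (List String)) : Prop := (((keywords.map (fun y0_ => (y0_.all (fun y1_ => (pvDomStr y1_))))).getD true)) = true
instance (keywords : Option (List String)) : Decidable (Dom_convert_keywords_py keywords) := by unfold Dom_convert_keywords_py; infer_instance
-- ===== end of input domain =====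

-- B replaces A's full-list stable sort + groupby by one dict-accumulating pass and a sort of the
-- distinct tags only (objective: alternative decomposition, same results).
-- Return-value equivalence only; neither version mutates its argument observably
-- (A rebinds `keywords` and sorts a private list).

-- ===== PORT A =====
-- itertools.groupby over a list, keyed by x[0]; split(':') is never empty, so x[0] is headD "".
def pyGroupby : List (List String) → List (String × List (List String))
  | [] => []
  | x :: xs =>
    (x.headD "", x :: xs.takeWhile (fun y => y.headD "" == x.headD "")) ::
      pyGroupby (xs.dropWhile (fun y => y.headD "" == x.headD ""))
  termination_by l => l.length
  decreasing_by exact Nat.lt_succ_of_le (List.length_dropWhile_le _ _)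

-- vl[1] is pyGet? vl 1 (IndexError, i.e. none, exactly when the keyword has no colon: outside Pre_).
def convert_keywords_py (keywords : Option (List String)) : List (String × String) :=
  match keywords with
  | none => []
  | some kws =>
    let kw_list := kws.map (fun kw => (PySem.Str.split? kw ":").getD [])
    let kw_sorted := PySem.List.sorted kw_list (fun x => x.headD "") false
    let kw_groups := pyGroupby kw_sorted
    (kw_groups.foldl (fun d g =>
        d.insert ("Tag_" ++ g.1)
          (PySem.Str.join ", " (g.2.map (fun vl =>
            PySem.Str.strip ((PySem.List.pyGet? vl 1).getD ""))))) PySem.Dict.empty).items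

-- ===== PORT B =====
def convert_keywords_py_alt (keywords : Option (List String)) : List (String × String) :=
  match keywords with
  | none => []
  | some kws =>
    let acc := kws.foldl (fun d kw =>
      let parts := (PySem.Str.split? kw ":").getD []
      d.modify (parts.headD "") []
        (fun v => v ++ [PySem.Str.strip ((PySem.List.pyGet? parts 1).getD "")])) PySem.Dict.empty
    (PySem.List.sorted acc.keys (fun k => k) false).map
      (fun k => ("Tag_" ++ k, PySem.Str.join ", " (acc.getD k [])))

-- ===== PRECONDITION & SPEC =====
-- Pre_ excludes exactly the inputs with a colon-less keyword, on which Python A raises IndexError (vl[1]).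
def Pre_convert_keywords_py (keywords : Option (List String)) : Prop :=
  ∀ kw ∈ keywords.getD [], ':' ∈ kw.toList
instance (keywords : Option (List String)) : Decidable (Pre_convert_keywords_py keywords) := by
  unfold Pre_convert_keywords_py; infer_instance

def pvWitness_convert_keywords_py : Option (List String) :=
  some ["15: E100-2-23", "16: Person", "16: Setup", "24: Phil"]

def Spec_convert_keywords_py (keywords : Option (List String)) (out : List (String × String)) : Prop :=
  out = convert_keywords_py_alt keywords
instance (keywords : Option (List String)) (out : List (String × String)) :
    Decidable (Spec_convert_keywords_py keywords out) := by
  unfold Spec_convert_keywords_py; infer_instance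

-- ===== CLAIM (what is proved, stated in full; the proofs are below) =====
def Claim_equal_convert_keywords_py : Prop := ∀ (keywords : Option (List String)),
  Dom_convert_keywords_py keywords → Pre_convert_keywords_py keywords →
  Spec_convert_keywords_py keywords (convert_keywords_py keywords)

-- ===== LEMMAS AND PROOFS =====

-- the key and value extractors both ports share semantically
def keyf (x : List String) : String := x.headD ""
def valf (x : List String) : String := PySem.Str.strip ((PySem.List.pyGet? x 1).getD "")

-- STABILITY of insertion sort w.r.t. one key class
theorem filter_insertBy {α κ : Type} [LinearOrder κ] [BEq κ] [LawfulBEq κ]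
    (key : α → κ) (k : κ) (x : α) (acc : List α)
    (h : (acc.map key).Pairwise (· ≤ ·)) :
    (PySem.List.insertBy (fun a b => decide (key a < key b)) x acc).filter (fun y => key y == k)
      = if key x == k then acc.filter (fun y => key y == k) ++ [x]
        else acc.filter (fun y => key y == k) := by
  induction acc with
  | nil =>
    by_cases hk : key x == k <;> simp [PySem.List.insertBy, hk]
  | cons y ys ih =>
    simp only [List.map_cons, List.pairwise_cons] at h
    obtain ⟨hy, hys⟩ := h
    by_cases hlt : key x < key y
    · have hnil : (y :: ys).filter (fun z => key z == k) = [] ∨ ¬ (key x == k) := by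
        by_cases hk : key x == k
        · left
          refine List.filter_eq_nil_iff.mpr ?_
          intro z hz
          have hgt : key x < key z := by
            rcases List.mem_cons.mp hz with rfl | hz'
            · exact hlt
            · exact lt_of_lt_of_le hlt (hy _ (List.mem_map_of_mem hz'))
          simp only [beq_iff_eq] at hk ⊢
          intro hzk; rw [hzk, hk] at hgt; exact lt_irrefl _ hgt
        · right; exact hk
      rcases hnil with hnil | hk
      · by_cases hk : key x == k
        · simp [PySem.List.insertBy, hlt, hk, hnil]
        · simp [PySem.List.insertBy, hlt, hk, hnil]
      · simp only [beq_iff_eq] at hk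
        simp [PySem.List.insertBy, hlt, hk]
    · have := ih hys
      by_cases hyk : key y == k <;> by_cases hk : key x == k <;>
        simp [PySem.List.insertBy, hlt, hyk, hk, this]

theorem filter_sorted {α κ : Type} [LinearOrder κ] [BEq κ] [LawfulBEq κ]
    (key : α → κ) (k : κ) (xs : List α) :
    (PySem.List.sorted xs key false).filter (fun y => key y == k)
      = xs.filter (fun y => key y == k) := by
  induction xs using List.reverseRecOn with
  | nil => simp [PySem.List.sorted]
  | append_singleton l a ih =>
    rw [PySem.List.sorted_eq_foldl_insertBy, List.foldl_append, List.foldl_cons, List.foldl_nil,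
      ← PySem.List.sorted_eq_foldl_insertBy]
    rw [filter_insertBy key k a _ (PySem.List.sorted_map_key_pairwise l key), ih]
    by_cases hk : key a == k <;> simp [List.filter_append, hk]

-- Set.ofList helpers
theorem foldl_add_absorb {α : Type} [BEq α] [LawfulBEq α] (l : List α) (s : List α)
    (h : ∀ x ∈ l, x ∈ s) : List.foldl PySem.Set.add s l = s := by
  induction l generalizing s with
  | nil => rfl
  | cons x l ih =>
    have hx : PySem.Set.add s x = s := by
      simp [PySem.Set.add, PySem.Set.contains, h x List.mem_cons_self]
    rw [List.foldl_cons, hx]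
    exact ih s (fun z hz => h z (List.mem_cons_of_mem _ hz))

theorem foldl_add_cons {α : Type} [BEq α] [LawfulBEq α] (a : α) (l : List α) (s : List α)
    (hl : a ∉ l) (hs : a ∉ s) :
    List.foldl PySem.Set.add (a :: s) l = a :: List.foldl PySem.Set.add s l := by
  induction l generalizing s with
  | nil => rfl
  | cons x l ih =>
    have hax : a ≠ x := fun h => hl (h ▸ List.mem_cons_self)
    have hc : (a :: s).contains x = s.contains x := by
      simp [hax.symm]
    rw [List.foldl_cons, List.foldl_cons]
    by_cases hm : x ∈ s
    · have h1 : PySem.Set.add (a :: s) x = a :: s := by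
        simp [PySem.Set.add, PySem.Set.contains, hm]
      have h2 : PySem.Set.add s x = s := by simp [PySem.Set.add, PySem.Set.contains, hm]
      rw [h1, h2]; exact ih s (fun h => hl (List.mem_cons_of_mem _ h)) hs
    · have h1 : PySem.Set.add (a :: s) x = a :: (s ++ [x]) := by
        simp [PySem.Set.add, PySem.Set.contains, hm, hax.symm]
      have h2 : PySem.Set.add s x = s ++ [x] := by simp [PySem.Set.add, PySem.Set.contains, hm]
      rw [h1, h2]
      refine ih (s ++ [x]) (fun h => hl (List.mem_cons_of_mem _ h)) ?_
      intro hmem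
      rcases List.mem_append.mp hmem with h | h
      · exact hs h
      · exact hax (List.mem_singleton.mp h)

theorem foldl_add_sublist {α : Type} [BEq α] [LawfulBEq α] (l : List α) (s : List α) :
    ∃ t, List.foldl PySem.Set.add s l = s ++ t ∧ t.Sublist l := by
  induction l generalizing s with
  | nil => exact ⟨[], by simp⟩
  | cons x l ih =>
    rw [List.foldl_cons]
    by_cases hm : x ∈ s
    · have h1 : PySem.Set.add s x = s := by simp [PySem.Set.add, PySem.Set.contains, hm]
      obtain ⟨t, ht, hsub⟩ := ih s
      exact ⟨t, by rw [h1]; exact ht, hsub.cons x⟩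
    · have h1 : PySem.Set.add s x = s ++ [x] := by simp [PySem.Set.add, PySem.Set.contains, hm]
      obtain ⟨t, ht, hsub⟩ := ih (s ++ [x])
      exact ⟨x :: t, by rw [h1, ht, List.append_assoc]; rfl, hsub.cons₂ x⟩

theorem ofList_sublist {α : Type} [BEq α] [LawfulBEq α] (l : List α) :
    (PySem.Set.ofList l).Sublist l := by
  obtain ⟨t, ht, hsub⟩ := foldl_add_sublist l []
  simpa [PySem.Set.ofList, PySem.Set.empty, ht] using hsub

theorem pairwise_lt_ofList {α : Type} [LinearOrder α] [BEq α] [LawfulBEq α] (l : List α)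
    (h : l.Pairwise (· ≤ ·)) : (PySem.Set.ofList l).Pairwise (· < ·) := by
  have hle : (PySem.Set.ofList l).Pairwise (· ≤ ·) := List.Pairwise.sublist (ofList_sublist l) h
  have hne : (PySem.Set.ofList l).Pairwise (· ≠ ·) := PySem.Set.nodup_ofList l
  exact (hle.and hne).imp (fun h => lt_of_le_of_ne h.1 h.2)

-- within a key-sorted run, FILTER on the first key is TAKEWHILE
theorem filter_eq_takeWhile (K : String) (t : List (List String))
    (h : (t.map keyf).Pairwise (· ≤ ·)) (hK : ∀ y ∈ t, K ≤ keyf y) :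
    t.filter (fun y => y.headD "" == K) = t.takeWhile (fun y => y.headD "" == K) := by
  induction t with
  | nil => rfl
  | cons y t ih =>
    simp only [List.map_cons, List.pairwise_cons] at h
    obtain ⟨hy, ht⟩ := h
    by_cases hk : y.headD "" == K
    · simp only [List.filter_cons, List.takeWhile_cons, hk, if_true]
      rw [ih ht (fun z hz => hK z (List.mem_cons_of_mem _ hz))]
    · simp only [List.filter_cons, List.takeWhile_cons, hk, Bool.false_eq_true, if_false]
      refine List.filter_eq_nil_iff.mpr (fun z hz => ?_)
      have h1 : K < keyf y :=
        lt_of_le_of_ne (hK y List.mem_cons_self)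
          (fun h => hk (by simp only [beq_iff_eq]; exact h.symm))
      have h2 : keyf y ≤ keyf z := hy _ (List.mem_map_of_mem hz)
      simp only [beq_iff_eq]
      intro hzk
      exact absurd (lt_of_lt_of_le h1 h2)
        (by rw [show keyf z = K from hzk]; exact lt_irrefl K)

theorem dropWhile_gt (K : String) (t : List (List String))
    (h : (t.map keyf).Pairwise (· ≤ ·)) (hK : ∀ y ∈ t, K ≤ keyf y) :
    ∀ y ∈ t.dropWhile (fun y => y.headD "" == K), K < keyf y := by
  induction t with
  | nil => simp
  | cons y t ih =>
    simp only [List.map_cons, List.pairwise_cons] at h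
    obtain ⟨hy, ht⟩ := h
    by_cases hk : y.headD "" == K
    · simp only [List.dropWhile_cons, hk, if_true]
      exact ih ht (fun z hz => hK z (List.mem_cons_of_mem _ hz))
    · simp only [List.dropWhile_cons, hk, Bool.false_eq_true, if_false]
      intro z hz
      have h1 : K < keyf y :=
        lt_of_le_of_ne (hK y List.mem_cons_self)
          (fun h => hk (by simp only [beq_iff_eq]; exact h.symm))
      rcases List.mem_cons.mp hz with rfl | hz'
      · exact h1
      · exact lt_of_lt_of_le h1 (hy _ (List.mem_map_of_mem hz'))

-- consecutive grouping of a key-sorted list is grouping by the distinct keys, with filtered groups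
theorem groupby_of_pairwise (ys : List (List String))
    (h : (ys.map keyf).Pairwise (· ≤ ·)) :
    pyGroupby ys = (PySem.Set.ofList (ys.map keyf)).map
      (fun k => (k, ys.filter (fun y => y.headD "" == k))) := by
  induction ys using pyGroupby.induct with
  | case1 => simp [pyGroupby]
  | case2 x xs ih =>
    simp only [List.map_cons, List.pairwise_cons] at h
    obtain ⟨hx, hxs⟩ := h
    have hK : ∀ y ∈ xs, keyf x ≤ keyf y := fun y hy => hx _ (List.mem_map_of_mem hy)
    set K := x.headD "" with hKdef
    have hKf : keyf x = K := rfl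
    set p : List String → Bool := fun y => y.headD "" == K with hp
    set tw := xs.takeWhile p with htw
    set dw := xs.dropWhile p with hdw
    have hdwsub : dw.Sublist xs := List.dropWhile_sublist p
    have hdwpw : (dw.map keyf).Pairwise (· ≤ ·) := List.Pairwise.sublist (hdwsub.map keyf) hxs
    have hgt : ∀ y ∈ dw, K < keyf y := dropWhile_gt K xs hxs (hKf ▸ hK)
    -- decompose the key list
    have hsplitkeys : (x :: xs).map keyf = K :: (tw.map keyf ++ dw.map keyf) := by
      rw [← List.map_append, htw, hdw, List.takeWhile_append_dropWhile]
      rfl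
    -- Set.ofList of that decomposition
    have hof : PySem.Set.ofList ((x :: xs).map keyf) = K :: PySem.Set.ofList (dw.map keyf) := by
      rw [hsplitkeys]
      have h0 : PySem.Set.ofList (K :: (tw.map keyf ++ dw.map keyf))
          = List.foldl PySem.Set.add [K] (tw.map keyf ++ dw.map keyf) := by
        simp only [PySem.Set.ofList, List.foldl_cons]
        rfl
      rw [h0, List.foldl_append]
      have h1 : List.foldl PySem.Set.add [K] (tw.map keyf) = [K] := by
        refine foldl_add_absorb _ _ (fun z hz => ?_)
        obtain ⟨y, hy, rfl⟩ := List.mem_map.mp hz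
        have := List.mem_takeWhile_imp hy
        simp only [hp, beq_iff_eq] at this
        exact List.mem_singleton.mpr this
      have hKnmem : K ∉ dw.map keyf := by
        intro hmem
        obtain ⟨y, hy, hyk⟩ := List.mem_map.mp hmem
        exact absurd (hgt y hy) (by simp [hyk])
      rw [h1, foldl_add_cons K _ [] hKnmem (by simp)]
      rfl
    rw [pyGroupby, hof, List.map_cons]
    congr 1
    · -- head group
      have hxK : (x.headD "" == K) = true := by simp [hKdef]
      simp only [List.filter_cons, hxK, if_true]
      rw [filter_eq_takeWhile K xs hxs (hKf ▸ hK)]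
    · -- tail groups
      rw [ih hdwpw]
      refine List.map_congr_left (fun k hk => ?_)
      have hKk : K < k := by
        have hmem := (ofList_sublist (dw.map keyf)).mem hk
        obtain ⟨y, hy, rfl⟩ := List.mem_map.mp hmem
        exact hgt y hy
      congr 1
      symm
      -- filter over x :: xs = filter over dw, for k > K
      have hxk : ¬ (x.headD "" == k) := by
        simp only [beq_iff_eq]
        intro hxx
        exact absurd hKk (by simp [hKdef, ← hxx])
      simp only [List.filter_cons, hxk, Bool.false_eq_true, if_false]
      rw [← List.takeWhile_append_dropWhile (p := p) (l := xs),
        List.filter_append, ← htw, ← hdw]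
      have h2 : tw.filter (fun y => y.headD "" == k) = [] := by
        refine List.filter_eq_nil_iff.mpr (fun z hz => ?_)
        have := List.mem_takeWhile_imp hz
        simp only [hp, beq_iff_eq] at this
        simp only [beq_iff_eq, this]
        intro hKk'; rw [hKk'] at hKk; exact lt_irrefl _ hKk
      rw [h2, List.nil_append]

-- "Tag_" ++ · is injective
theorem tag_inj : Function.Injective (fun k : String => "Tag_" ++ k) := by
  intro a b h
  have h2 := congrArg String.toList h
  simp only [String.toList_append] at h2
  have h3 := List.append_cancel_left h2
  exact String.toList_injective h3

-- sorted distinct keys of the sorted list = sorted of the distinct keys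
theorem sorted_keys_eq (xs : List (List String)) :
    PySem.List.sorted (PySem.Set.ofList (xs.map keyf)) (fun k => k) false
      = PySem.Set.ofList ((PySem.List.sorted xs keyf false).map keyf) := by
  refine PySem.List.sorted_eq_of_perm_of_pairwise_lt _ _ _ ?_ ?_
  · refine (List.perm_ext_iff_of_nodup (PySem.Set.nodup_ofList _) (PySem.Set.nodup_ofList _)).mpr
      (fun a => ?_)
    simp only [PySem.Set.mem_ofList, List.mem_map]
    constructor
    · rintro ⟨y, hy, rfl⟩
      exact ⟨y, (PySem.List.mem_sorted _ _ _ _).mp hy, rfl⟩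
    · rintro ⟨y, hy, rfl⟩
      exact ⟨y, (PySem.List.mem_sorted _ _ _ _).mpr hy, rfl⟩
  · exact pairwise_lt_ofList _ (PySem.List.sorted_map_key_pairwise xs keyf)

-- ===== MAIN PROOF =====
theorem main_eq (keywords : Option (List String)) :
    convert_keywords_py keywords = convert_keywords_py_alt keywords := by
  cases keywords with
  | none => rfl
  | some kws =>
    simp only [convert_keywords_py, convert_keywords_py_alt]
    set xs := kws.map (fun kw => (PySem.Str.split? kw ":").getD []) with hxs
    -- B's accumulator, re-expressed as a fold over (key, value) pairs
    set pf : String → String × String := fun kw =>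
      (((PySem.Str.split? kw ":").getD []).headD "",
        PySem.Str.strip ((PySem.List.pyGet? ((PySem.Str.split? kw ":").getD []) 1).getD "")) with hpf
    have hfold : kws.foldl (fun d kw =>
        let parts := (PySem.Str.split? kw ":").getD []
        d.modify (parts.headD "") []
          (fun v => v ++ [PySem.Str.strip ((PySem.List.pyGet? parts 1).getD "")])) PySem.Dict.empty
        = (kws.map pf).foldl (fun d p => d.modify p.1 [] (fun v => v ++ [p.2])) PySem.Dict.empty := by
      rw [List.foldl_map]
    rw [hfold]
    set acc := (kws.map pf).foldl (fun d p => d.modify p.1 [] (fun v => v ++ [p.2]))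
      PySem.Dict.empty with hacc
    -- keys of acc
    have hkeys : acc.keys = PySem.Set.ofList (xs.map keyf) := by
      rw [hacc, PySem.Dict.keys_foldl_modify_key (l := kws.map pf)
        (key := fun p : String × String => p.1) (d0 := ([] : List String))
        (f := fun _ p v => v ++ [p.2]) (d := PySem.Dict.empty)]
      have : (kws.map pf).map (fun p => p.1) = xs.map keyf := by
        simp [hpf, hxs, List.map_map, keyf, Function.comp_def]
      rw [this]
      rfl
    -- values of acc
    have hgetD : ∀ k, acc.getD k [] = (xs.filter (fun y => y.headD "" == k)).map valf := by
      intro k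
      rw [hacc, PySem.Dict.getD_foldl_modify_append]
      have : (kws.map pf).filter (fun p => p.1 == k)
          = (kws.filter (fun kw => (pf kw).1 == k)).map pf := by
        rw [List.filter_map]; rfl
      rw [this, PySem.Dict.getD_empty, List.nil_append, List.map_map]
      rw [hxs, List.filter_map, List.map_map]
      rfl
    -- A's groups
    have hpw : ((PySem.List.sorted xs keyf false).map keyf).Pairwise (· ≤ ·) :=
      PySem.List.sorted_map_key_pairwise xs keyf
    have hsortedxs : PySem.List.sorted xs (fun x => x.headD "") false
        = PySem.List.sorted xs keyf false := rfl
    rw [hsortedxs, groupby_of_pairwise _ hpw]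
    set sk := PySem.Set.ofList ((PySem.List.sorted xs keyf false).map keyf) with hsk
    -- A's dict fill appends the fresh distinct keys
    have hitems := PySem.Dict.items_foldl_insert_fresh
      (l := sk.map (fun k => (k, (PySem.List.sorted xs keyf false).filter (fun y => y.headD "" == k))))
      (k := fun g => "Tag_" ++ g.1)
      (v := fun g => PySem.Str.join ", " (g.2.map (fun vl =>
        PySem.Str.strip ((PySem.List.pyGet? vl 1).getD ""))))
      (d := PySem.Dict.empty)
      (by intro a _; rfl)
      (by
        have : (sk.map (fun k => (k, (PySem.List.sorted xs keyf false).filter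
            (fun y => y.headD "" == k)))).map (fun g => "Tag_" ++ g.1)
            = sk.map (fun k => "Tag_" ++ k) := by
          simp [List.map_map, Function.comp_def]
        rw [this]
        exact (PySem.Set.nodup_ofList _).map tag_inj)
    rw [hitems]
    have hempty : (PySem.Dict.empty : PySem.Dict String String).items = [] := rfl
    rw [hempty, List.nil_append, List.map_map, hkeys, sorted_keys_eq, ← hsk]
    refine List.map_congr_left (fun k _ => ?_)
    simp only [Function.comp_def]
    congr 1
    rw [hgetD k]
    exact congrArg (fun l => PySem.Str.join ", " (List.map valf l)) (filter_sorted keyf k xs)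

-- ===== VERDICT (by name: the statement is the Claim_ definition above) =====
theorem convert_keywords_py_spec : Claim_equal_convert_keywords_py := by
  intro keywords _ _
  unfold Spec_convert_keywords_py
  exact main_eq keywords
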